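-- pv_equiv track=rewrite | github.com/CDMY0417/Tool_MATH | function_tools/function_total/28w8kw.py | generate_2_5_factor_numbers
-- ===== SOURCE A (Python) =====
-- def generate_2_5_factor_numbers(limit: int) -> list:
--     numbers = set()
--     m, n = 0, 0
--     value = 2**m * 5**n
--     while value <= limit:
--         n = 0
--         while 2**m * 5**n <= limit:
--             numbers.add(2**m * 5**n)
--             n += 1
--         m += 1
--         value = 2**m
--     return sorted(numbers)
-- ===== SOURCE B (Python) =====
-- def generate_2_5_factor_numbers(limit: int) -> list:
--     def fives(lim):
--         # {5**n : 5**n <= lim}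
--         if lim < 1:
--             return set()
--         return {1} | {5 * x for x in fives(lim // 5)}
--     def smooth(lim):
--         # {2**m * 5**n : 2**m * 5**n <= lim}
--         if lim < 1:
--             return set()
--         return fives(lim) | {2 * x for x in smooth(lim // 2)}
--     return sorted(smooth(limit))
-- ===== Notes on version B (the rewrite author's own statement) =====
-- stated objective: alternative
-- what changed: Replaces A's nested exponent-grid while-loops (trying each power product against the limit) by recursion on the limit itself: the pure powers of five are collected by recursing on the limit floor-divided by five, the full set by adding doubled copies of the recursive result for the halved limit, then one final sort.
import Mathlib
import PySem

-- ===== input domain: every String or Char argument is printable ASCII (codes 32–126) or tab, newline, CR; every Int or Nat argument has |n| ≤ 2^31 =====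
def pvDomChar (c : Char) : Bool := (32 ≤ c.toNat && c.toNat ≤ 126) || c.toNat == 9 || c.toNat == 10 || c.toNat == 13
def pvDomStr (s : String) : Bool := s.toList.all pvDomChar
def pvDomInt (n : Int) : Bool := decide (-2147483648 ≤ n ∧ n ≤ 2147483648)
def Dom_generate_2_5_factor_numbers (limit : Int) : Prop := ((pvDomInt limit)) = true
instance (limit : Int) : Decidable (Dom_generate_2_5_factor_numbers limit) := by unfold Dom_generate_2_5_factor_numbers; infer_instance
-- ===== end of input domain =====

-- B replaces A's nested exponent-grid while-loops by two recursions on the limit: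
-- fives(lim) = {1} | 5*fives(lim//5), smooth(lim) = fives(lim) | 2*smooth(lim//2); alternative decomposition.


-- ===== PORT A =====
-- inner while loop: 'while 2**m * 5**n <= limit: numbers.add(2**m * 5**n); n += 1'
-- (structural recursion on a fuel bound; the fuel limit.toNat+1 always exceeds the
-- iteration count, since the loop value 2^m*5^n grows each step — proved in the lemmas)
def pvInnerA (limit : Int) (m : Nat) : Nat → Nat → PySem.Set Int → PySem.Set Int
  | 0, _, s => s
  | fuel+1, n, s =>
    if (2:Int)^m * 5^n ≤ limit then
      pvInnerA limit m fuel (n+1) (PySem.Set.add s ((2:Int)^m * 5^n))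
    else s

-- outer while loop: the loop guard is 'value <= limit' where value = 2**0 * 5**0 = 2**0
-- before the first iteration and value = 2**m after each, i.e. always 2**m <= limit.
def pvOuterA (limit : Int) : Nat → Nat → PySem.Set Int → PySem.Set Int
  | 0, _, s => s
  | fuel+1, m, s =>
    if (2:Int)^m ≤ limit then
      pvOuterA limit fuel (m+1) (pvInnerA limit m (limit.toNat+1) 0 s)
    else s

def generate_2_5_factor_numbers (limit : Int) : List Int :=
  PySem.List.sorted (pvOuterA limit (limit.toNat+1) 0 PySem.Set.empty) (fun x => x) false

-- ===== PORT B =====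
-- fives(lim): {} if lim < 1, else {1} | {5*x for x in fives(lim//5)}
-- (fuel lim.toNat bounds the recursion depth: lim//5 shrinks lim.toNat — proved in the lemmas)
def pvFivesB : Nat → Int → PySem.Set Int
  | 0, _ => PySem.Set.empty
  | fuel+1, lim =>
    if lim < 1 then PySem.Set.empty
    else PySem.Set.union (PySem.Set.add PySem.Set.empty 1)
      ((pvFivesB fuel (PySem.Int.floordiv lim 5)).map (fun x => 5*x))

-- smooth(lim): {} if lim < 1, else fives(lim) | {2*x for x in smooth(lim//2)}
def pvSmoothB : Nat → Int → PySem.Set Int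
  | 0, _ => PySem.Set.empty
  | fuel+1, lim =>
    if lim < 1 then PySem.Set.empty
    else PySem.Set.union (pvFivesB lim.toNat lim)
      ((pvSmoothB fuel (PySem.Int.floordiv lim 2)).map (fun x => 2*x))

def generate_2_5_factor_numbers_alt (limit : Int) : List Int :=
  PySem.List.sorted (pvSmoothB limit.toNat limit) (fun x => x) false

-- ===== PRECONDITION & SPEC =====
def Spec_generate_2_5_factor_numbers (limit : Int) (out : List Int) : Prop := out = generate_2_5_factor_numbers_alt limit
instance (limit : Int) (out : List Int) : Decidable (Spec_generate_2_5_factor_numbers limit out) := by unfold Spec_generate_2_5_factor_numbers; infer_instance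

-- ===== CLAIM (what is proved, stated in full; the proofs are below) =====
def Claim_equal_generate_2_5_factor_numbers : Prop := ∀ (limit : Int), Dom_generate_2_5_factor_numbers limit → Spec_generate_2_5_factor_numbers limit (generate_2_5_factor_numbers limit)

-- ===== LEMMAS AND PROOFS =====

theorem mem_pvInnerA (limit : Int) (m : Nat) :
    ∀ (fuel n : Nat) (s : PySem.Set Int), (limit + 1 - (2:Int)^m * 5^n).toNat ≤ fuel →
    ∀ x : Int, x ∈ pvInnerA limit m fuel n s ↔
      x ∈ s ∨ ∃ k, n ≤ k ∧ x = 2^m * 5^k ∧ x ≤ limit := by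
  intro fuel
  induction fuel with
  | zero =>
    intro n s hf x
    simp only [pvInnerA, iff_self_or]
    rintro ⟨k, hk, rfl, hle⟩
    have hcon : False := by
      have h5 : (5:Int)^n ≤ 5^k := pow_le_pow_right₀ (by norm_num) hk
      have h2 : (0:Int) < 2^m := by positivity
      have hmul : (2:Int)^m * 5^n ≤ 2^m * 5^k := by nlinarith
      have hle' : (2:Int)^m * 5^n ≤ limit := le_trans hmul hle
      generalize hy : (2:Int)^m * 5^n = y at hle' hf
      omega
    exact hcon.elim
  | succ fuel ih =>
    intro n s hf x
    simp only [pvInnerA]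
    split_ifs with hle
    · have h2 : (1:Int) ≤ (2:Int)^m := one_le_pow₀ (by norm_num)
      have h5 : (1:Int) ≤ (5:Int)^n := one_le_pow₀ (by norm_num)
      have hx : (1:Int) ≤ 2^m * 5^n := by nlinarith
      have hstep : (2:Int)^m * 5^(n+1) = 5 * (2^m * 5^n) := by ring
      rw [ih (n+1) _ (by generalize hy : (2:Int)^m * 5^n = y at *; omega) x]
      simp only [PySem.Set.mem_add]
      constructor
      · rintro (⟨h | rfl⟩ | ⟨k, hk, rfl, hkle⟩)
        · exact Or.inl h
        · exact Or.inr ⟨n, le_refl n, rfl, hle⟩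
        · exact Or.inr ⟨k, by omega, rfl, hkle⟩
      · rintro (h | ⟨k, hk, rfl, hkle⟩)
        · exact Or.inl (Or.inl h)
        · rcases Nat.eq_or_lt_of_le hk with rfl | hk'
          · exact Or.inl (Or.inr rfl)
          · exact Or.inr ⟨k, by omega, rfl, hkle⟩
    · simp only [iff_self_or]
      rintro ⟨k, hk, rfl, hkle⟩
      have h5 : (5:Int)^n ≤ 5^k := pow_le_pow_right₀ (by norm_num) hk
      have h2 : (0:Int) < 2^m := by positivity
      have hmul : (2:Int)^m * 5^n ≤ 2^m * 5^k := by nlinarith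
      exact (hle (le_trans hmul hkle)).elim

theorem mem_pvOuterA (limit : Int) :
    ∀ (fuel m : Nat) (s : PySem.Set Int), (limit + 1 - (2:Int)^m).toNat ≤ fuel →
    ∀ x : Int, x ∈ pvOuterA limit fuel m s ↔
      x ∈ s ∨ ∃ j k : Nat, m ≤ j ∧ x = 2^j * 5^k ∧ x ≤ limit := by
  intro fuel
  induction fuel with
  | zero =>
    intro m s hf x
    simp only [pvOuterA, iff_self_or]
    rintro ⟨j, k, hj, rfl, hle⟩
    have hcon : False := by
      have h2 : (2:Int)^m ≤ 2^j := pow_le_pow_right₀ (by norm_num) hj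
      have h5 : (1:Int) ≤ 5^k := one_le_pow₀ (by norm_num)
      have h5' : (2:Int)^j ≤ 2^j * 5^k := le_mul_of_one_le_right (by positivity) h5
      have hle' : (2:Int)^m ≤ limit := le_trans h2 (le_trans h5' hle)
      generalize hy : (2:Int)^m = y at hle' hf
      omega
    exact hcon.elim
  | succ fuel ih =>
    intro m s hf x
    simp only [pvOuterA]
    split_ifs with hle
    · have h2 : (1:Int) ≤ (2:Int)^m := one_le_pow₀ (by norm_num)
      have hstep : (2:Int)^(m+1) = 2 * 2^m := by ring
      rw [ih (m+1) _ (by generalize hy : (2:Int)^m = y at *; omega) x,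
        mem_pvInnerA limit m (limit.toNat+1) 0 s (by generalize hy : (2:Int)^m = y at *; omega) x]
      constructor
      · rintro (⟨h | ⟨k, _, rfl, hkle⟩⟩ | ⟨j, k, hj, rfl, hkle⟩)
        · exact Or.inl h
        · exact Or.inr ⟨m, k, le_refl m, rfl, hkle⟩
        · exact Or.inr ⟨j, k, by omega, rfl, hkle⟩
      · rintro (h | ⟨j, k, hj, rfl, hkle⟩)
        · exact Or.inl (Or.inl h)
        · rcases Nat.eq_or_lt_of_le hj with rfl | hj'
          · exact Or.inl (Or.inr ⟨k, Nat.zero_le k, rfl, hkle⟩)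
          · exact Or.inr ⟨j, k, by omega, rfl, hkle⟩
    · simp only [iff_self_or]
      rintro ⟨j, k, hj, rfl, hkle⟩
      have h2 : (2:Int)^m ≤ 2^j := pow_le_pow_right₀ (by norm_num) hj
      have h5 : (1:Int) ≤ 5^k := one_le_pow₀ (by norm_num)
      have h5' : (2:Int)^j ≤ 2^j * 5^k := le_mul_of_one_le_right (by positivity) h5
      exact (hle (le_trans h2 (le_trans h5' hkle))).elim

theorem nodup_pvInnerA (limit : Int) (m : Nat) :
    ∀ (fuel n : Nat) (s : PySem.Set Int), s.Nodup → (pvInnerA limit m fuel n s).Nodup := by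
  intro fuel
  induction fuel with
  | zero => intro n s h; simpa [pvInnerA] using h
  | succ fuel ih =>
    intro n s h
    simp only [pvInnerA]
    split_ifs with hle
    · exact ih (n+1) _ (PySem.Set.nodup_add _ _ h)
    · exact h

theorem nodup_pvOuterA (limit : Int) :
    ∀ (fuel m : Nat) (s : PySem.Set Int), s.Nodup → (pvOuterA limit fuel m s).Nodup := by
  intro fuel
  induction fuel with
  | zero => intro m s h; simpa [pvOuterA] using h
  | succ fuel ih =>
    intro m s h
    simp only [pvOuterA]
    split_ifs with hle
    · exact ih (m+1) _ (nodup_pvInnerA limit m (limit.toNat+1) 0 s h)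
    · exact h

theorem mem_pvFivesB :
    ∀ (fuel : Nat) (lim : Int), lim.toNat ≤ fuel →
    ∀ x : Int, x ∈ pvFivesB fuel lim ↔ ∃ n : Nat, x = 5^n ∧ x ≤ lim := by
  intro fuel
  induction fuel with
  | zero =>
    intro lim hf x
    simp only [pvFivesB, PySem.Set.empty, List.not_mem_nil, false_iff]
    rintro ⟨n, rfl, hle⟩
    have h5 : (1:Int) ≤ 5^n := one_le_pow₀ (by norm_num)
    have hlim : (1:Int) ≤ lim := le_trans h5 hle
    omega
  | succ fuel ih =>
    intro lim hf x
    simp only [pvFivesB]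
    split_ifs with hlt
    · simp only [PySem.Set.empty, List.not_mem_nil, false_iff]
      rintro ⟨n, rfl, hle⟩
      have h5 : (1:Int) ≤ 5^n := one_le_pow₀ (by norm_num)
      have hlim : (1:Int) ≤ lim := le_trans h5 hle
      omega
    · have hdiv : PySem.Int.floordiv lim 5 = lim / 5 :=
        PySem.Int.floordiv_eq_ediv_of_pos (by norm_num)
      have hfd : (lim / 5).toNat ≤ fuel := by omega
      rw [PySem.Set.mem_union]
      simp only [hdiv, List.mem_map, PySem.Set.mem_add, ih (lim / 5) hfd]
      constructor
      · rintro ((h | h) | ⟨y, ⟨n, rfl, hle⟩, rfl⟩)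
        · simp [PySem.Set.empty] at h
        · exact ⟨0, by simpa using h, by omega⟩
        · refine ⟨n+1, by ring, ?_⟩
          have := (Int.le_ediv_iff_mul_le (by norm_num : (0:Int) < 5)).mp hle
          have heq : (5:Int)^(n+1) = 5^n * 5 := by ring
          omega
      · rintro ⟨n, rfl, hle⟩
        match n with
        | 0 => exact Or.inl (Or.inr (by norm_num))
        | n+1 =>
          refine Or.inr ⟨5^n, ⟨n, rfl, ?_⟩, by ring⟩
          rw [Int.le_ediv_iff_mul_le (by norm_num : (0:Int) < 5)]
          have heq : (5:Int)^(n+1) = 5^n * 5 := by ring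
          omega

theorem mem_pvSmoothB :
    ∀ (fuel : Nat) (lim : Int), lim.toNat ≤ fuel →
    ∀ x : Int, x ∈ pvSmoothB fuel lim ↔ ∃ m n : Nat, x = 2^m * 5^n ∧ x ≤ lim := by
  intro fuel
  induction fuel with
  | zero =>
    intro lim hf x
    simp only [pvSmoothB, PySem.Set.empty, List.not_mem_nil, false_iff]
    rintro ⟨m, n, rfl, hle⟩
    have h2 : (1:Int) ≤ 2^m := one_le_pow₀ (by norm_num)
    have h5 : (1:Int) ≤ 5^n := one_le_pow₀ (by norm_num)
    have hx : (1:Int) ≤ 2^m * 5^n := by nlinarith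
    have hlim : (1:Int) ≤ lim := le_trans hx hle
    omega
  | succ fuel ih =>
    intro lim hf x
    simp only [pvSmoothB]
    split_ifs with hlt
    · simp only [PySem.Set.empty, List.not_mem_nil, false_iff]
      rintro ⟨m, n, rfl, hle⟩
      have h2 : (1:Int) ≤ 2^m := one_le_pow₀ (by norm_num)
      have h5 : (1:Int) ≤ 5^n := one_le_pow₀ (by norm_num)
      have hx : (1:Int) ≤ 2^m * 5^n := by nlinarith
      have hlim : (1:Int) ≤ lim := le_trans hx hle
      omega
    · have hdiv : PySem.Int.floordiv lim 2 = lim / 2 :=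
        PySem.Int.floordiv_eq_ediv_of_pos (by norm_num)
      have hfd : (lim / 2).toNat ≤ fuel := by omega
      rw [PySem.Set.mem_union]
      simp only [hdiv, List.mem_map, mem_pvFivesB lim.toNat lim (le_refl _),
        ih (lim / 2) hfd]
      constructor
      · rintro (⟨n, rfl, hle⟩ | ⟨y, ⟨m, n, rfl, hle⟩, rfl⟩)
        · exact ⟨0, n, by ring, by omega⟩
        · refine ⟨m+1, n, by ring, ?_⟩
          have := (Int.le_ediv_iff_mul_le (by norm_num : (0:Int) < 2)).mp hle
          have heq : (2:Int)^(m+1) * 5^n = 2^m * 5^n * 2 := by ring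
          omega
      · rintro ⟨m, n, rfl, hle⟩
        match m with
        | 0 => exact Or.inl ⟨n, by ring, by omega⟩
        | m+1 =>
          refine Or.inr ⟨2^m * 5^n, ⟨m, n, rfl, ?_⟩, by ring⟩
          rw [Int.le_ediv_iff_mul_le (by norm_num : (0:Int) < 2)]
          have heq : (2:Int)^(m+1) * 5^n = 2^m * 5^n * 2 := by ring
          omega

theorem nodup_pvFivesB : ∀ (fuel : Nat) (lim : Int), (pvFivesB fuel lim).Nodup := by
  intro fuel
  induction fuel with
  | zero => intro lim; simp [pvFivesB, PySem.Set.empty]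
  | succ fuel ih =>
    intro lim
    simp only [pvFivesB]
    split_ifs with hlt
    · simp [PySem.Set.empty]
    · exact PySem.Set.nodup_union _ _ (PySem.Set.nodup_add _ _ (by simp [PySem.Set.empty]))

theorem nodup_pvSmoothB : ∀ (fuel : Nat) (lim : Int), (pvSmoothB fuel lim).Nodup := by
  intro fuel
  induction fuel with
  | zero => intro lim; simp [pvSmoothB, PySem.Set.empty]
  | succ fuel ih =>
    intro lim
    simp only [pvSmoothB]
    split_ifs with hlt
    · simp [PySem.Set.empty]
    · exact PySem.Set.nodup_union _ _ (nodup_pvFivesB lim.toNat lim)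

-- ===== VERDICT (by name: the statement is the Claim_ definition above) =====
theorem generate_2_5_factor_numbers_spec : Claim_equal_generate_2_5_factor_numbers := by
  intro limit _
  unfold Spec_generate_2_5_factor_numbers generate_2_5_factor_numbers generate_2_5_factor_numbers_alt
  rw [PySem.List.sorted_id_eq_sorted_id_iff_perm]
  rw [List.perm_ext_iff_of_nodup
    (nodup_pvOuterA limit (limit.toNat+1) 0 PySem.Set.empty (by simp [PySem.Set.empty]))
    (nodup_pvSmoothB limit.toNat limit)]
  intro a
  rw [mem_pvOuterA limit (limit.toNat+1) 0 PySem.Set.empty (by simp only [pow_zero]; omega) a,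
    mem_pvSmoothB limit.toNat limit (le_refl _) a]
  simp [PySem.Set.empty]
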